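-- pv_equiv track=rewrite | github.com/NasLabBgu/STEM | stance_classification/data/text_processing.py | fix_longation
-- ===== SOURCE A (Python) =====
-- from typing import List, Tuple, Union
--
-- def fix_longation(token: str) -> Union[None, str]:
--     found_longation = False
--     new_token = []
--     similar_prev = 0
--     for i, c in enumerate(token):
--         if (i > 0) and (c == token[i - 1]):
--             similar_prev += 1
--             if similar_prev == 2:
--                 found_longation = True
--                 new_token.pop()
--             elif similar_prev < 2:
--                 new_token.append(c)
--
--             continue
--
--         similar_prev = 0
--         new_token.append(c)
--
--     if found_longation:
--         return "".join(new_token)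
--
--     return None
-- ===== SOURCE B (Python) =====
-- from itertools import groupby
--
-- def fix_longation(token: str):
--     found = False
--     parts = []
--     for ch, grp in groupby(token):
--         n = sum(1 for _ in grp)
--         if n == 2:
--             parts.append(ch + ch)
--         else:
--             parts.append(ch)
--             if n >= 3:
--                 found = True
--     return "".join(parts) if found else None
-- ===== Notes on version B (the rewrite author's own statement) =====
-- stated objective: idiomatic
-- what changed: B iterates over maximal character runs via itertools.groupby and emits each run at once (two chars for a run of length 2, one char otherwise, flagging runs of length >= 3), replacing A's per-character index loop with the similar_prev counter and the pop() call.
import Mathlib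
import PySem

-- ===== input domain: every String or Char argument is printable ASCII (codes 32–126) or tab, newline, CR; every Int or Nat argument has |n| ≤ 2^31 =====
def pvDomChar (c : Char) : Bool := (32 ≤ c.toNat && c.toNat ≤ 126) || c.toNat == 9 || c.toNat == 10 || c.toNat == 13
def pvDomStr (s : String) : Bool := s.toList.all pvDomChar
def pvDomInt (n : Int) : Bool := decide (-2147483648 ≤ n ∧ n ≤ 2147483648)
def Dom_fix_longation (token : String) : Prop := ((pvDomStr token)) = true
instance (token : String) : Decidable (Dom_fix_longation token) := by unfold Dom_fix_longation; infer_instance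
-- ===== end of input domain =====

-- B iterates over maximal runs (itertools.groupby) instead of A's index/counter loop; objective: simpler decomposition, same cost.

-- ===== PORT A =====
-- loop body of A: state = (found_longation, new_token, similar_prev)
def pvAStep (cs : List Char) (st : Bool × List Char × Int) (ic : Int × Char) : Bool × List Char × Int :=
  if 0 < ic.1 ∧ PySem.List.pyGet? cs (ic.1 - 1) = some ic.2 then
    let sp := st.2.2 + 1
    if sp = 2 then (true, st.2.1.dropLast, sp)
    else if sp < 2 then (st.1, st.2.1 ++ [ic.2], sp)
    else (st.1, st.2.1, sp)
  else (st.1, st.2.1 ++ [ic.2], 0)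

def fix_longation (token : String) : Option String :=
  let cs := token.toList
  let st := (PySem.List.enumerate cs 0).foldl (pvAStep cs) (false, [], 0)
  if st.1 then some (String.ofList st.2.1) else none

-- ===== PORT B =====
-- itertools.groupby(token): the list of maximal runs, as (char, run length)
def pvRunsAux : Char → Nat → List Char → List (Char × Nat)
  | c, n, [] => [(c, n)]
  | c, n, d :: ds => if d = c then pvRunsAux c (n + 1) ds else (c, n) :: pvRunsAux d 1 ds

def pvRuns : List Char → List (Char × Nat)
  | [] => []
  | c :: cs => pvRunsAux c 1 cs

-- B's loop body: state = (found, parts) (parts kept as chars; "".join concatenates)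
def pvBStep (st : Bool × List Char) (p : Char × Nat) : Bool × List Char :=
  if p.2 = 2 then (st.1, st.2 ++ [p.1, p.1])
  else (st.1 || decide (3 ≤ p.2), st.2 ++ [p.1])

def fix_longation_alt (token : String) : Option String :=
  let st := (pvRuns token.toList).foldl pvBStep (false, [])
  if st.1 then some (String.ofList st.2) else none

-- ===== PRECONDITION & SPEC =====
def Spec_fix_longation (token : String) (out : Option String) : Prop := out = fix_longation_alt token
instance (token : String) (out : Option String) : Decidable (Spec_fix_longation token out) := by unfold Spec_fix_longation; infer_instance

-- ===== CLAIM (what is proved, stated in full; the proofs are below) =====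
def Claim_equal_fix_longation : Prop := ∀ (token : String), Dom_fix_longation token → Spec_fix_longation token (fix_longation token)

-- ===== LEMMAS AND PROOFS =====

-- A's loop rewritten with the previous character carried explicitly instead of token[i-1]
def pvAGo : List Char → Option Char → (Bool × List Char × Int) → (Bool × List Char × Int)
  | [], _, st => st
  | c :: rest, prev, st =>
    if prev = some c then
      let sp := st.2.2 + 1
      pvAGo rest (some c)
        (if sp = 2 then (true, st.2.1.dropLast, sp)
         else if sp < 2 then (st.1, st.2.1 ++ [c], sp)
         else (st.1, st.2.1, sp))
    else pvAGo rest (some c) (st.1, st.2.1 ++ [c], 0)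

lemma pvBridge : ∀ (rest pre : List Char) (st : Bool × List Char × Int),
    (PySem.List.enumerate rest (pre.length : Int)).foldl (pvAStep (pre ++ rest)) st
      = pvAGo rest pre.getLast? st := by
  intro rest
  induction rest with
  | nil => intro pre st; simp [pvAGo, PySem.List.enumerate_nil]
  | cons c rest ih =>
    intro pre st
    rw [PySem.List.enumerate_cons, List.foldl_cons]
    have hcond : (0 < (pre.length : Int) ∧
        PySem.List.pyGet? (pre ++ c :: rest) ((pre.length : Int) - 1) = some c) ↔
        pre.getLast? = some c := by
      rcases List.eq_nil_or_concat pre with rfl | ⟨q, p, rfl⟩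
      · simp
      · simp only [List.concat_eq_append]
        have h1 : (((q ++ [p]).length : Int)) - 1 = (q.length : Int) := by simp
        have h2 : (q ++ [p]) ++ c :: rest = q ++ p :: (c :: rest) := by simp
        rw [h1, h2, PySem.List.pyGet?_append_length]
        simp
    have hlen : (pre.length : Int) + 1 = (((pre ++ [c]).length : Int)) := by simp
    have hrw : pre ++ c :: rest = (pre ++ [c]) ++ rest := by simp
    by_cases h : pre.getLast? = some c
    · have hstep : pvAStep (pre ++ c :: rest) st ((pre.length : Int), c)
          = (if st.2.2 + 1 = 2 then (true, st.2.1.dropLast, st.2.2 + 1)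
             else if st.2.2 + 1 < 2 then (st.1, st.2.1 ++ [c], st.2.2 + 1)
             else (st.1, st.2.1, st.2.2 + 1)) := by
        unfold pvAStep
        rw [if_pos (hcond.mpr h)]
      rw [hstep, hlen, hrw, ih (pre ++ [c])]
      rw [pvAGo, if_pos h]
      simp
    · have hstep : pvAStep (pre ++ c :: rest) st ((pre.length : Int), c)
          = (st.1, st.2.1 ++ [c], 0) := by
        unfold pvAStep
        rw [if_neg (by rw [hcond]; exact h)]
      rw [hstep, hlen, hrw, ih (pre ++ [c])]
      rw [pvAGo, if_neg h]
      simp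

def pvChunk (p : Char) (m : Nat) : List Char := if m = 2 then [p, p] else [p]

lemma pvMain : ∀ (rest : List Char) (p : Char) (m : Nat) (f : Bool) (base : List Char), 1 ≤ m →
    (pvAGo rest (some p) (f || decide (3 ≤ m), base ++ pvChunk p m, (m : Int) - 1)).1
        = ((pvRunsAux p m rest).foldl pvBStep (f, base)).1
    ∧ (pvAGo rest (some p) (f || decide (3 ≤ m), base ++ pvChunk p m, (m : Int) - 1)).2.1
        = ((pvRunsAux p m rest).foldl pvBStep (f, base)).2 := by
  intro rest
  induction rest with
  | nil =>
    intro p m f base hm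
    by_cases hm2 : m = 2
    · subst hm2; simp [pvAGo, pvRunsAux, pvBStep, pvChunk]
    · simp [pvAGo, pvRunsAux, pvBStep, pvChunk, hm2]
  | cons d ds ih =>
    intro p m f base hm
    by_cases hdp : d = p
    · subst hdp
      rw [pvRunsAux, if_pos rfl]
      rw [pvAGo, if_pos rfl]
      dsimp only
      have hst : (if ((m : Int) - 1) + 1 = 2 then
              (true, (base ++ pvChunk d m).dropLast, ((m : Int) - 1) + 1)
            else if ((m : Int) - 1) + 1 < 2 then
              (f || decide (3 ≤ m), (base ++ pvChunk d m) ++ [d], ((m : Int) - 1) + 1)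
            else (f || decide (3 ≤ m), base ++ pvChunk d m, ((m : Int) - 1) + 1))
          = (f || decide (3 ≤ m + 1), base ++ pvChunk d (m + 1), ((m + 1 : Nat) : Int) - 1) := by
        rcases Nat.lt_or_ge m 3 with h3 | h3
        · interval_cases m
          · norm_num [pvChunk]
          · norm_num [pvChunk]
            rw [show base ++ [d, d] = (base ++ [d]) ++ [d] by simp]
            rw [List.dropLast_concat]
        · have h2 : ¬ (((m : Int) - 1) + 1 = 2) := by omega
          have h2' : ¬ (((m : Int) - 1) + 1 < 2) := by omega
          rw [if_neg h2, if_neg h2']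
          have hne : m ≠ 2 := by omega
          have hne' : m + 1 ≠ 2 := by omega
          simp only [pvChunk, if_neg hne, if_neg hne', Prod.mk.injEq]
          refine ⟨by rw [decide_eq_true (by omega : 3 ≤ m), decide_eq_true (by omega : 3 ≤ m + 1)], trivial, by push_cast; ring⟩
      rw [hst]
      exact ih d (m + 1) f base (by omega)
    · rw [pvRunsAux, if_neg hdp, List.foldl_cons]
      rw [pvAGo, if_neg (by simpa using fun h => hdp h.symm)]
      have hb : pvBStep (f, base) (p, m)
          = (f || decide (3 ≤ m), base ++ pvChunk p m) := by
        unfold pvBStep pvChunk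
        by_cases hm2 : m = 2
        · simp [hm2]
        · simp [hm2]
      rw [hb]
      have := ih d 1 (f || decide (3 ≤ m)) (base ++ pvChunk p m) (le_refl 1)
      simpa [pvChunk] using this

-- ===== VERDICT (by name: the statement is the Claim_ definition above) =====
theorem fix_longation_spec : Claim_equal_fix_longation := by
  intro token _
  unfold Spec_fix_longation fix_longation fix_longation_alt
  dsimp only
  have hb := pvBridge token.toList [] (false, [], 0)
  simp only [List.nil_append, List.length_nil, Int.natCast_zero, List.getLast?_nil] at hb
  rw [hb]
  cases h : token.toList with
  | nil => simp [pvAGo, pvRuns]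
  | cons c rest =>
    have hgo : pvAGo (c :: rest) none (false, [], 0) = pvAGo rest (some c) (false, [c], 0) := by
      simp [pvAGo]
    rw [hgo]
    have hm := pvMain rest c 1 false [] (le_refl 1)
    simp only [pvChunk, List.nil_append] at hm
    norm_num at hm
    rw [pvRuns]
    obtain ⟨h1, h2⟩ := hm
    rw [← h1, ← h2]
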